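-- pv_equiv track=rewrite | github.com/RanjitMane7/Python-Practice-Codes | Correct_Path.py | counter_x
-- ===== SOURCE A (Python) =====
-- def counter_x(sample) :
--     countx = 0
--     for i in sample :
--         if i == 'r' :
--             countx += 1
--         elif i == 'l' :
--             countx -= 1
--     return countx
-- ===== SOURCE B (Python) =====
-- def counter_x(sample):
--     return sample.count('r') - sample.count('l')
-- ===== Notes on version B (the rewrite author's own statement) =====
-- stated objective: idiomatic
-- what changed: Replaces the explicit loop with a running accumulator by two independent str.count scans subtracted, with no loop or branch logic.
import Mathlib
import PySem

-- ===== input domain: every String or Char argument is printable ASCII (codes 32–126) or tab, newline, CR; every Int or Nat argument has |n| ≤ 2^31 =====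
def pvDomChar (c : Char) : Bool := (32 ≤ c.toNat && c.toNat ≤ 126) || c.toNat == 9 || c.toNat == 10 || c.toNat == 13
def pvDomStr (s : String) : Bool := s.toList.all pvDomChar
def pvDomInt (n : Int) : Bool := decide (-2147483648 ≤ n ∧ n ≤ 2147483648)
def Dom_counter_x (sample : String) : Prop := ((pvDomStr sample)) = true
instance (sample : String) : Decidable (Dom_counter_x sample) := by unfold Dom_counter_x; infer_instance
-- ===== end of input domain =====

-- B replaces A's single accumulator loop by two independent count passes subtracted (idiomatic).

-- ===== PORT A =====
def counter_x (sample : String) : Int :=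
  sample.toList.foldl
    (fun countx i =>
      if i == 'r' then countx + 1
      else if i == 'l' then countx - 1
      else countx) 0

-- ===== PORT B =====
-- sample.count('r') for a one-character needle is exactly the character count.
def counter_x_alt (sample : String) : Int :=
  (sample.toList.count 'r' : Int) - (sample.toList.count 'l' : Int)

-- ===== PRECONDITION & SPEC =====
def Spec_counter_x (sample : String) (out : Int) : Prop := out = counter_x_alt sample
instance (sample : String) (out : Int) : Decidable (Spec_counter_x sample out) := by unfold Spec_counter_x; infer_instance

-- ===== CLAIM (what is proved, stated in full; the proofs are below) =====
def Claim_equal_counter_x : Prop := ∀ (sample : String), Dom_counter_x sample → Spec_counter_x sample (counter_x sample)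

-- ===== LEMMAS AND PROOFS =====
theorem counter_x_loop (l : List Char) (a : Int) :
    l.foldl (fun countx i =>
      if i == 'r' then countx + 1
      else if i == 'l' then countx - 1
      else countx) a = a + (l.count 'r' : Int) - (l.count 'l' : Int) := by
  induction l generalizing a with
  | nil => simp
  | cons c cs ih =>
    simp only [List.foldl, ih, List.count_cons]
    by_cases hr : c = 'r' <;> by_cases hl : c = 'l' <;>
      simp [hr, hl] <;> omega

-- ===== VERDICT (by name: the statement is the Claim_ definition above) =====
theorem counter_x_spec : Claim_equal_counter_x := by
  intro sample _
  unfold Spec_counter_x counter_x counter_x_alt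
  rw [counter_x_loop]
  omega
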